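-- pv_equiv track=rewrite | github.com/jaehwan-AI/coding_test | 거리두기_확인하기/거리두기_확인하기_jaehwan.py | check
-- ===== SOURCE A (Python) =====
-- dx = [-1, 1, 0, 0]
--
-- dy = [0, 0, -1, 1]
--
-- di = [-1, -1, 1, 1]
--
-- dj = [-1, 1, -1, 1]
--
-- ddx = [-2, 2, 0, 0]
--
-- ddy = [0, 0, -2, 2]
--
-- def check(c, dic):
--     for i in range(4):
--         nx, ny = c[0]+dx[i], c[1]+dy[i]
--         if nx >= 0 and nx <= 4 and ny >= 0 and ny <= 4:
--             target = (nx, ny)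
--             if dic[target] == 'P':
--                 return 0
--
--         ni, nj = c[0]+di[i], c[1]+dj[i]
--         if ni >= 0 and ni <= 4 and nj >= 0 and nj <= 4:
--             target = (ni, nj)
--             target1 = (c[0], nj)
--             target2 = (ni, c[1])
--             if dic[target] == 'P':
--                 if dic[target1] == 'O' or dic[target2] == 'O':
--                     return 0
--
--         nnx, nny = c[0]+ddx[i], c[1]+ddy[i]
--         if nnx >= 0 and nnx <= 4 and nny >= 0 and nny <= 4:
--             target1 = (nx, ny)
--             target2 = (nnx, nny)
--             if dic[target2] == 'P':
--                 if dic[target1] == 'O' or dic[target1] == 'P':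
--                     return 0
--     return 1
-- ===== SOURCE B (Python) =====
-- def check(c, dic):
--     # Depth-2 BFS from c over the 5x5 grid: a cell is passable if it holds 'O'
--     # (a 'P' cell ends the search immediately); return 0 iff a 'P' is reached.
--     start = (c[0], c[1])
--     visited = {start}
--     frontier = [start]
--     for _ in range(2):
--         nxt = []
--         for (x, y) in frontier:
--             for q in ((x - 1, y), (x + 1, y), (x, y - 1), (x, y + 1)):
--                 if 0 <= q[0] <= 4 and 0 <= q[1] <= 4 and q not in visited:
--                     visited.add(q)
--                     v = dic.get(q)
--                     if v == 'P':
--                         return 0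
--                     if v == 'O':
--                         nxt.append(q)
--         frontier = nxt
--     return 1
-- ===== Notes on version B (the rewrite author's own statement) =====
-- stated objective: alternative
-- what changed: A's three hand-coded offset-table scans (orthogonal, diagonal with explicit corner conditions, distance-2 with explicit midpoint conditions) are replaced by a depth-2 BFS from c over the 5x5 grid with a frontier list and a visited set, where only 'O' cells are expanded and reaching any 'P' cell returns 0.
-- outside the precondition, e.g. on check((0, 0), {(1, 0): 'P'}): A returns 0, B returns 0; on check((2, 2), {}): A raises KeyError, B returns 1; on check((0, 0), {(0, 1): 'O'}): A raises KeyError, B returns 1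
import Mathlib
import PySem

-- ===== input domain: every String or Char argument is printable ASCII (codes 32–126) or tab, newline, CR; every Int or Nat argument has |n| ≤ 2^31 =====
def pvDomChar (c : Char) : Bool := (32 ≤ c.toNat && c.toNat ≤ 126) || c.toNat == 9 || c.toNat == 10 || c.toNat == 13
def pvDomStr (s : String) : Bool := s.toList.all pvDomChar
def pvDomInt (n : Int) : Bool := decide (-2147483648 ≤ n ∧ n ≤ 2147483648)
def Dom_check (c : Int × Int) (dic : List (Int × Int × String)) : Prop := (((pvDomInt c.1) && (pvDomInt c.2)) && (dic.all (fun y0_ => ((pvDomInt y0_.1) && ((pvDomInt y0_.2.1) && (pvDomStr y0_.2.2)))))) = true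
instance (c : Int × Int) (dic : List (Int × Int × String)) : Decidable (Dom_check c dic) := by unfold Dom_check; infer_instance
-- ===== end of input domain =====

-- B replaces A's three hand-written offset-table checks by a depth-2 BFS over the 5x5 grid
-- (frontier + visited set); equivalence of the return value is proved on Pre_check.

-- ===== PORT A =====
-- dic[(x,y)] : first-match association lookup; "" stands for Python's KeyError,
-- which Pre_check excludes.
def lookupA (dic : List (Int × Int × String)) (x y : Int) : String :=
  match dic with
  | [] => ""
  | (a, b, s) :: t => if a = x ∧ b = y then s else lookupA t x y

def dxA : List Int := [-1, 1, 0, 0]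
def dyA : List Int := [0, 0, -1, 1]
def diA : List Int := [-1, -1, 1, 1]
def djA : List Int := [-1, 1, -1, 1]
def ddxA : List Int := [-2, 2, 0, 0]
def ddyA : List Int := [0, 0, -2, 2]

-- one iteration of A's loop body: some 0 = "return 0", none = fall through
def checkStep (c : Int × Int) (dic : List (Int × Int × String)) (i : Nat) : Option Int :=
  let nx := c.1 + dxA.getD i 0
  let ny := c.2 + dyA.getD i 0
  if nx ≥ 0 ∧ nx ≤ 4 ∧ ny ≥ 0 ∧ ny ≤ 4 ∧ lookupA dic nx ny = "P" then some 0
  else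
    let ni := c.1 + diA.getD i 0
    let nj := c.2 + djA.getD i 0
    if ni ≥ 0 ∧ ni ≤ 4 ∧ nj ≥ 0 ∧ nj ≤ 4 ∧ lookupA dic ni nj = "P" ∧
        (lookupA dic c.1 nj = "O" ∨ lookupA dic ni c.2 = "O") then some 0
    else
      let nnx := c.1 + ddxA.getD i 0
      let nny := c.2 + ddyA.getD i 0
      if nnx ≥ 0 ∧ nnx ≤ 4 ∧ nny ≥ 0 ∧ nny ≤ 4 ∧ lookupA dic nnx nny = "P" ∧
          (lookupA dic nx ny = "O" ∨ lookupA dic nx ny = "P") then some 0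
      else none

def checkLoop (c : Int × Int) (dic : List (Int × Int × String)) : List Nat → Int
  | [] => 1
  | i :: rest =>
    match checkStep c dic i with
    | some r => r
    | none => checkLoop c dic rest

def check (c : Int × Int) (dic : List (Int × Int × String)) : Int :=
  checkLoop c dic [0, 1, 2, 3]

-- ===== PORT B =====
-- dic.get((x,y)) : first-match association lookup, none when absent.
def getB (dic : List (Int × Int × String)) (q : Int × Int) : Option String :=
  match dic with
  | [] => none
  | (a, b, s) :: t => if a = q.1 ∧ b = q.2 then some s else getB t q

def nbrsB (p : Int × Int) : List (Int × Int) :=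
  [(p.1 - 1, p.2), (p.1 + 1, p.2), (p.1, p.2 - 1), (p.1, p.2 + 1)]

-- inner loop over the four neighbours of one frontier cell:
-- none = "return 0" (a 'P' was reached), some = updated (visited, next frontier)
def expandCell (dic : List (Int × Int × String)) (v : PySem.Set (Int × Int))
    (nxt : List (Int × Int)) :
    List (Int × Int) → Option (PySem.Set (Int × Int) × List (Int × Int))
  | [] => some (v, nxt)
  | q :: qs =>
    if 0 ≤ q.1 ∧ q.1 ≤ 4 ∧ 0 ≤ q.2 ∧ q.2 ≤ 4 ∧ q ∉ v then
      let v' := PySem.Set.add v q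
      if getB dic q = some "P" then none
      else if getB dic q = some "O" then expandCell dic v' (nxt ++ [q]) qs
      else expandCell dic v' nxt qs
    else expandCell dic v nxt qs

-- loop over the frontier cells
def expandFrontier (dic : List (Int × Int × String)) :
    List (Int × Int) → PySem.Set (Int × Int) → List (Int × Int) →
    Option (PySem.Set (Int × Int) × List (Int × Int))
  | [], v, n => some (v, n)
  | p :: ps, v, n =>
    match expandCell dic v n (nbrsB p) with
    | none => none
    | some (v', n') => expandFrontier dic ps v' n'

def check_alt (c : Int × Int) (dic : List (Int × Int × String)) : Int :=
  let s := (c.1, c.2)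
  let v0 := PySem.Set.add PySem.Set.empty s
  match expandFrontier dic [s] v0 [] with
  | none => 0
  | some (v1, f1) =>
    match expandFrontier dic f1 v1 [] with
    | none => 0
    | some _ => 1

-- ===== PRECONDITION & SPEC =====
def inbB (p : Int × Int) : Bool :=
  decide (0 ≤ p.1 ∧ p.1 ≤ 4 ∧ 0 ≤ p.2 ∧ p.2 ≤ 4)

-- the twelve cells A's loop may probe around c (orthogonal 1, diagonal, orthogonal 2)
def offsAll : List (Int × Int) :=
  [(-1, 0), (1, 0), (0, -1), (0, 1), (-1, -1), (-1, 1), (1, -1), (1, 1),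
   (-2, 0), (2, 0), (0, -2), (0, 2)]

-- Pre_check admits (a) centres so far off the grid that A probes no cell at all, and
-- (b) centres inside the 5x5 grid whose in-grid cells at taxicab distance 1-2 are all
-- keys of dic.  Excluded are inputs on which A may raise KeyError (or, for off-grid
-- centres, probe keys outside the grid); this also excludes some inputs on which A
-- happens to return early before touching a missing key — see the claim's cites.
def Pre_check (c : Int × Int) (dic : List (Int × Int × String)) : Prop :=
  (∀ o ∈ offsAll, inbB (c.1 + o.1, c.2 + o.2) = false) ∨
  ((0 ≤ c.1 ∧ c.1 ≤ 4 ∧ 0 ≤ c.2 ∧ c.2 ≤ 4) ∧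
   ∀ o ∈ offsAll, inbB (c.1 + o.1, c.2 + o.2) = true →
     dic.any (fun e => decide (e.1 = c.1 + o.1 ∧ e.2.1 = c.2 + o.2)) = true)

instance (c : Int × Int) (dic : List (Int × Int × String)) : Decidable (Pre_check c dic) := by
  unfold Pre_check; infer_instance

def pvWitness_check : (Int × Int) × (List (Int × Int × String)) :=
  ((2, 2), [(1, 2, "X"), (3, 2, "X"), (2, 1, "X"), (2, 3, "X"),
            (1, 1, "X"), (1, 3, "X"), (3, 1, "X"), (3, 3, "X"),
            (0, 2, "X"), (4, 2, "X"), (2, 0, "X"), (2, 4, "X")])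

def Spec_check (c : Int × Int) (dic : List (Int × Int × String)) (out : Int) : Prop := out = check_alt c dic
instance (c : Int × Int) (dic : List (Int × Int × String)) (out : Int) : Decidable (Spec_check c dic out) := by unfold Spec_check; infer_instance

-- ===== CLAIM (what is proved, stated in full; the proofs are below) =====
def Claim_equal_check : Prop := ∀ (c : Int × Int) (dic : List (Int × Int × String)), Dom_check c dic → Pre_check c dic → Spec_check c dic (check c dic)

-- ===== LEMMAS AND PROOFS =====

-- ---- generic facts about the lookups ----

theorem lookupA_eq_getB (dic : List (Int × Int × String)) (x y : Int) :
    lookupA dic x y = (getB dic (x, y)).getD "" := by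
  induction dic with
  | nil => rfl
  | cons e t ih =>
    obtain ⟨a, b, s⟩ := e
    simp only [lookupA, getB]
    split_ifs <;> simp [ih]

theorem lookupA_eq_iff (dic : List (Int × Int × String)) (x y : Int) (s : String)
    (hs : s ≠ "") : lookupA dic x y = s ↔ getB dic (x, y) = some s := by
  rw [lookupA_eq_getB]
  cases h : getB dic (x, y) with
  | none => simp [hs.symm]
  | some t => simp

theorem lookupA_P (dic : List (Int × Int × String)) (x y : Int) :
    lookupA dic x y = "P" ↔ getB dic (x, y) = some "P" :=
  lookupA_eq_iff dic x y "P" (by decide)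

theorem lookupA_O (dic : List (Int × Int × String)) (x y : Int) :
    lookupA dic x y = "O" ↔ getB dic (x, y) = some "O" :=
  lookupA_eq_iff dic x y "O" (by decide)

-- ---- the common atoms ----

abbrev inbI (x y : Int) : Prop := 0 ≤ x ∧ x ≤ 4 ∧ 0 ≤ y ∧ y ≤ 4

def atP (c : Int × Int) (dic : List (Int × Int × String)) (a b : Int) : Prop :=
  getB dic (c.1 + a, c.2 + b) = some "P"

def atO (c : Int × Int) (dic : List (Int × Int × String)) (a b : Int) : Prop :=
  getB dic (c.1 + a, c.2 + b) = some "O"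

def atB (c : Int × Int) (a b : Int) : Prop := inbI (c.1 + a) (c.2 + b)

-- what A's four loop iterations test
def ACond (c : Int × Int) (dic : List (Int × Int × String)) : Prop :=
  ((atB c (-1) 0 ∧ atP c dic (-1) 0) ∨
    (atB c (-1) (-1) ∧ atP c dic (-1) (-1) ∧ (atO c dic 0 (-1) ∨ atO c dic (-1) 0)) ∨
    (atB c (-2) 0 ∧ atP c dic (-2) 0 ∧ (atO c dic (-1) 0 ∨ atP c dic (-1) 0))) ∨
  ((atB c 1 0 ∧ atP c dic 1 0) ∨
    (atB c (-1) 1 ∧ atP c dic (-1) 1 ∧ (atO c dic 0 1 ∨ atO c dic (-1) 0)) ∨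
    (atB c 2 0 ∧ atP c dic 2 0 ∧ (atO c dic 1 0 ∨ atP c dic 1 0))) ∨
  ((atB c 0 (-1) ∧ atP c dic 0 (-1)) ∨
    (atB c 1 (-1) ∧ atP c dic 1 (-1) ∧ (atO c dic 0 (-1) ∨ atO c dic 1 0)) ∨
    (atB c 0 (-2) ∧ atP c dic 0 (-2) ∧ (atO c dic 0 (-1) ∨ atP c dic 0 (-1)))) ∨
  ((atB c 0 1 ∧ atP c dic 0 1) ∨
    (atB c 1 1 ∧ atP c dic 1 1 ∧ (atO c dic 0 1 ∨ atO c dic 1 0)) ∨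
    (atB c 0 2 ∧ atP c dic 0 2 ∧ (atO c dic 0 1 ∨ atP c dic 0 1)))

-- what B's two BFS rounds test
def targB (c : Int × Int) (dic : List (Int × Int × String)) (a b : Int) : Prop :=
  atB c a b ∧ atP c dic a b

def BCond (c : Int × Int) (dic : List (Int × Int × String)) : Prop :=
  ((atB c (-1) 0 ∧ atP c dic (-1) 0) ∨ (atB c 1 0 ∧ atP c dic 1 0) ∨
    (atB c 0 (-1) ∧ atP c dic 0 (-1)) ∨ (atB c 0 1 ∧ atP c dic 0 1)) ∨
  ((atB c (-1) 0 ∧ atO c dic (-1) 0 ∧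
      (targB c dic (-2) 0 ∨ targB c dic (-1) (-1) ∨ targB c dic (-1) 1)) ∨
   (atB c 1 0 ∧ atO c dic 1 0 ∧
      (targB c dic 2 0 ∨ targB c dic 1 (-1) ∨ targB c dic 1 1)) ∨
   (atB c 0 (-1) ∧ atO c dic 0 (-1) ∧
      (targB c dic 0 (-2) ∨ targB c dic (-1) (-1) ∨ targB c dic 1 (-1))) ∨
   (atB c 0 1 ∧ atO c dic 0 1 ∧
      (targB c dic 0 2 ∨ targB c dic (-1) 1 ∨ targB c dic 1 1)))

-- ---- characterisation of A ----

theorem checkStep_none_iff_0 (c : Int × Int) (dic : List (Int × Int × String)) :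
    checkStep c dic 0 = none ↔
      ¬((atB c (-1) 0 ∧ atP c dic (-1) 0) ∨
        (atB c (-1) (-1) ∧ atP c dic (-1) (-1) ∧ (atO c dic 0 (-1) ∨ atO c dic (-1) 0)) ∨
        (atB c (-2) 0 ∧ atP c dic (-2) 0 ∧ (atO c dic (-1) 0 ∨ atP c dic (-1) 0))) := by
  simp only [checkStep, dxA, dyA, diA, djA, ddxA, ddyA, List.getD_cons_zero, List.getD_cons_succ]
  split_ifs with h1 h2 h3 <;>
    simp_all [atB, atP, atO, inbI, lookupA_P, lookupA_O]

theorem checkStep_some (c : Int × Int) (dic : List (Int × Int × String)) (i : Nat) :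
    checkStep c dic i = none ∨ checkStep c dic i = some 0 := by
  simp only [checkStep]
  split_ifs <;> simp

theorem check_vals (c : Int × Int) (dic : List (Int × Int × String)) :
    check c dic = 0 ∨ check c dic = 1 := by
  simp only [check, checkLoop]
  rcases checkStep_some c dic 0 with h | h <;> rw [h] <;> [skip; simp] <;>
  rcases checkStep_some c dic 1 with h | h <;> rw [h] <;> [skip; simp] <;>
  rcases checkStep_some c dic 2 with h | h <;> rw [h] <;> [skip; simp] <;>
  rcases checkStep_some c dic 3 with h | h <;> rw [h] <;> simp

theorem checkStep_none_iff_1 (c : Int × Int) (dic : List (Int × Int × String)) :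
    checkStep c dic 1 = none ↔
      ¬((atB c 1 0 ∧ atP c dic 1 0) ∨
        (atB c (-1) 1 ∧ atP c dic (-1) 1 ∧ (atO c dic 0 1 ∨ atO c dic (-1) 0)) ∨
        (atB c 2 0 ∧ atP c dic 2 0 ∧ (atO c dic 1 0 ∨ atP c dic 1 0))) := by
  simp only [checkStep, dxA, dyA, diA, djA, ddxA, ddyA, List.getD_cons_zero, List.getD_cons_succ]
  split_ifs with h1 h2 h3 <;>
    simp_all [atB, atP, atO, inbI, lookupA_P, lookupA_O]

theorem checkStep_none_iff_2 (c : Int × Int) (dic : List (Int × Int × String)) :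
    checkStep c dic 2 = none ↔
      ¬((atB c 0 (-1) ∧ atP c dic 0 (-1)) ∨
        (atB c 1 (-1) ∧ atP c dic 1 (-1) ∧ (atO c dic 0 (-1) ∨ atO c dic 1 0)) ∨
        (atB c 0 (-2) ∧ atP c dic 0 (-2) ∧ (atO c dic 0 (-1) ∨ atP c dic 0 (-1)))) := by
  simp only [checkStep, dxA, dyA, diA, djA, ddxA, ddyA, List.getD_cons_zero, List.getD_cons_succ]
  split_ifs with h1 h2 h3 <;>
    simp_all [atB, atP, atO, inbI, lookupA_P, lookupA_O]

theorem checkStep_none_iff_3 (c : Int × Int) (dic : List (Int × Int × String)) :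
    checkStep c dic 3 = none ↔
      ¬((atB c 0 1 ∧ atP c dic 0 1) ∨
        (atB c 1 1 ∧ atP c dic 1 1 ∧ (atO c dic 0 1 ∨ atO c dic 1 0)) ∨
        (atB c 0 2 ∧ atP c dic 0 2 ∧ (atO c dic 0 1 ∨ atP c dic 0 1))) := by
  simp only [checkStep, dxA, dyA, diA, djA, ddxA, ddyA, List.getD_cons_zero, List.getD_cons_succ]
  split_ifs with h1 h2 h3 <;>
    simp_all [atB, atP, atO, inbI, lookupA_P, lookupA_O]

theorem check_eq_zero_iff (c : Int × Int) (dic : List (Int × Int × String)) :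
    check c dic = 0 ↔ ACond c dic := by
  have e0 := checkStep_none_iff_0 c dic
  have e1 := checkStep_none_iff_1 c dic
  have e2 := checkStep_none_iff_2 c dic
  have e3 := checkStep_none_iff_3 c dic
  simp only [check, checkLoop, ACond]
  rcases checkStep_some c dic 0 with h0 | h0
  · rw [h0]; rw [e0] at h0
    rcases checkStep_some c dic 1 with h1 | h1
    · rw [h1]; rw [e1] at h1
      rcases checkStep_some c dic 2 with h2 | h2
      · rw [h2]; rw [e2] at h2
        rcases checkStep_some c dic 3 with h3 | h3
        · rw [h3]; rw [e3] at h3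
          constructor
          · intro h; exact absurd h one_ne_zero
          · rintro (h | h | h | h)
            · exact absurd h h0
            · exact absurd h h1
            · exact absurd h h2
            · exact absurd h h3
        · rw [h3]
          have h3' : ¬ checkStep c dic 3 = none := by rw [h3]; simp
          rw [e3, not_not] at h3'
          exact iff_of_true rfl (Or.inr (Or.inr (Or.inr h3')))
      · rw [h2]
        have h2' : ¬ checkStep c dic 2 = none := by rw [h2]; simp
        rw [e2, not_not] at h2'
        exact iff_of_true rfl (Or.inr (Or.inr (Or.inl h2')))
    · rw [h1]
      have h1' : ¬ checkStep c dic 1 = none := by rw [h1]; simp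
      rw [e1, not_not] at h1'
      exact iff_of_true rfl (Or.inr (Or.inl h1'))
  · rw [h0]
    have h0' : ¬ checkStep c dic 0 = none := by rw [h0]; simp
    rw [e0, not_not] at h0'
    exact iff_of_true rfl (Or.inl h0')

-- ---- characterisation of B's BFS rounds ----

theorem cellNone (dic : List (Int × Int × String)) (qs : List (Int × Int)) :
    ∀ (v : PySem.Set (Int × Int)) (n : List (Int × Int)),
      expandCell dic v n qs = none ↔
        ∃ q ∈ qs, inbI q.1 q.2 ∧ q ∉ v ∧ getB dic q = some "P" := by
  induction qs with
  | nil => intro v n; simp [expandCell]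
  | cons q0 qs ih =>
    intro v n
    simp only [expandCell]
    by_cases hg : 0 ≤ q0.1 ∧ q0.1 ≤ 4 ∧ 0 ≤ q0.2 ∧ q0.2 ≤ 4 ∧ q0 ∉ v
    · rw [if_pos hg]
      by_cases hP : getB dic q0 = some "P"
      · rw [if_pos hP]
        exact iff_of_true rfl
          ⟨q0, by simp, ⟨hg.1, hg.2.1, hg.2.2.1, hg.2.2.2.1⟩, hg.2.2.2.2, hP⟩
      · rw [if_neg hP]
        have tail : ∀ m, expandCell dic (PySem.Set.add v q0) m qs = none ↔
            (∃ q ∈ q0 :: qs, inbI q.1 q.2 ∧ q ∉ v ∧ getB dic q = some "P") := by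
          intro m
          rw [ih (PySem.Set.add v q0) m]
          constructor
          · rintro ⟨q, hm, hi, hv, hPq⟩
            exact ⟨q, List.mem_cons_of_mem _ hm, hi,
              fun hq => hv ((PySem.Set.mem_add _ _ _).mpr (Or.inl hq)), hPq⟩
          · rintro ⟨q, hm, hi, hv, hPq⟩
            rcases List.mem_cons.mp hm with rfl | hm'
            · exact absurd hPq hP
            · refine ⟨q, hm', hi, ?_, hPq⟩
              intro hq
              rcases (PySem.Set.mem_add _ _ _).mp hq with h | h
              · exact hv h
              · exact hP (h ▸ hPq)
        split_ifs with hO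
        · exact tail _
        · exact tail _
    · rw [if_neg hg, ih v n]
      constructor
      · rintro ⟨q, hm, hi, hv, hPq⟩
        exact ⟨q, List.mem_cons_of_mem _ hm, hi, hv, hPq⟩
      · rintro ⟨q, hm, hi, hv, hPq⟩
        rcases List.mem_cons.mp hm with rfl | hm'
        · exact absurd ⟨hi.1, hi.2.1, hi.2.2.1, hi.2.2.2, hv⟩ hg
        · exact ⟨q, hm', hi, hv, hPq⟩

theorem cellSome (dic : List (Int × Int × String)) (qs : List (Int × Int)) :
    ∀ (v : PySem.Set (Int × Int)) (n v' n' : List (Int × Int)),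
      expandCell dic v n qs = some (v', n') →
        (∀ x ∈ v, x ∈ v') ∧
        (∀ x ∈ v', x ∈ v ∨ x ∈ qs) ∧
        (∀ x ∈ v', x ∈ v ∨ ¬ getB dic x = some "P") ∧
        (∀ x ∈ qs, inbI x.1 x.2 → x ∈ v') ∧
        (∀ x ∈ n', x ∈ n ∨ (x ∈ qs ∧ inbI x.1 x.2 ∧ getB dic x = some "O")) ∧
        (∀ x ∈ n, x ∈ n') ∧
        (∀ x ∈ qs, inbI x.1 x.2 → x ∉ v → getB dic x = some "O" → x ∈ n') := by
  induction qs with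
  | nil =>
    intro v n v' n' h
    simp only [expandCell, Option.some.injEq, Prod.mk.injEq] at h
    obtain ⟨rfl, rfl⟩ := h
    exact ⟨fun x hx => hx, fun x hx => Or.inl hx, fun x hx => Or.inl hx, by simp,
      fun x hx => Or.inl hx, fun x hx => hx, by simp⟩
  | cons q0 qs ih =>
    intro v n v' n' h
    simp only [expandCell] at h
    by_cases hg : 0 ≤ q0.1 ∧ q0.1 ≤ 4 ∧ 0 ≤ q0.2 ∧ q0.2 ≤ 4 ∧ q0 ∉ v
    · rw [if_pos hg] at h
      by_cases hP : getB dic q0 = some "P"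
      · rw [if_pos hP] at h; exact absurd h (by simp)
      · rw [if_neg hP] at h
        by_cases hO : getB dic q0 = some "O"
        · rw [if_pos hO] at h
          obtain ⟨S1, S2, S3, S4, S5, S6, S7⟩ := ih (PySem.Set.add v q0) (n ++ [q0]) v' n' h
          refine ⟨?_, ?_, ?_, ?_, ?_, ?_, ?_⟩
          · intro x hx; exact S1 x ((PySem.Set.mem_add _ _ _).mpr (Or.inl hx))
          · intro x hx
            rcases S2 x hx with h' | h'
            · rcases (PySem.Set.mem_add _ _ _).mp h' with h'' | h''
              · exact Or.inl h''
              · exact Or.inr (by simp [h''])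
            · exact Or.inr (List.mem_cons_of_mem _ h')
          · intro x hx
            rcases S3 x hx with h' | h'
            · rcases (PySem.Set.mem_add _ _ _).mp h' with h'' | h''
              · exact Or.inl h''
              · exact Or.inr (h'' ▸ hP)
            · exact Or.inr h'
          · intro x hx hi
            rcases List.mem_cons.mp hx with rfl | hx'
            · exact S1 x ((PySem.Set.mem_add _ _ _).mpr (Or.inr rfl))
            · exact S4 x hx' hi
          · intro x hx
            rcases S5 x hx with h' | h'
            · rcases List.mem_append.mp h' with h'' | h''
              · exact Or.inl h''
              · have hx0 : x = q0 := by simpa using h''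
                subst hx0
                exact Or.inr ⟨by simp, ⟨hg.1, hg.2.1, hg.2.2.1, hg.2.2.2.1⟩, hO⟩
            · exact Or.inr ⟨List.mem_cons_of_mem _ h'.1, h'.2⟩
          · intro x hx; exact S6 x (List.mem_append.mpr (Or.inl hx))
          · intro x hx hi hv hOx
            rcases List.mem_cons.mp hx with rfl | hx'
            · exact S6 x (by simp)
            · by_cases hxv : x ∈ PySem.Set.add v q0
              · rcases (PySem.Set.mem_add _ _ _).mp hxv with h'' | h''
                · exact absurd h'' hv
                · subst h''; exact S6 x (by simp)
              · exact S7 x hx' hi hxv hOx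
        · rw [if_neg hO] at h
          obtain ⟨S1, S2, S3, S4, S5, S6, S7⟩ := ih (PySem.Set.add v q0) n v' n' h
          refine ⟨?_, ?_, ?_, ?_, ?_, ?_, ?_⟩
          · intro x hx; exact S1 x ((PySem.Set.mem_add _ _ _).mpr (Or.inl hx))
          · intro x hx
            rcases S2 x hx with h' | h'
            · rcases (PySem.Set.mem_add _ _ _).mp h' with h'' | h''
              · exact Or.inl h''
              · exact Or.inr (by simp [h''])
            · exact Or.inr (List.mem_cons_of_mem _ h')
          · intro x hx
            rcases S3 x hx with h' | h'
            · rcases (PySem.Set.mem_add _ _ _).mp h' with h'' | h''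
              · exact Or.inl h''
              · exact Or.inr (h'' ▸ hP)
            · exact Or.inr h'
          · intro x hx hi
            rcases List.mem_cons.mp hx with rfl | hx'
            · exact S1 x ((PySem.Set.mem_add _ _ _).mpr (Or.inr rfl))
            · exact S4 x hx' hi
          · intro x hx
            rcases S5 x hx with h' | h'
            · exact Or.inl h'
            · exact Or.inr ⟨List.mem_cons_of_mem _ h'.1, h'.2⟩
          · exact S6
          · intro x hx hi hv hOx
            rcases List.mem_cons.mp hx with rfl | hx'
            · exact absurd hOx hO
            · by_cases hxv : x ∈ PySem.Set.add v q0
              · rcases (PySem.Set.mem_add _ _ _).mp hxv with h'' | h''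
                · exact absurd h'' hv
                · subst h''; exact absurd hOx hO
              · exact S7 x hx' hi hxv hOx
    · rw [if_neg hg] at h
      obtain ⟨S1, S2, S3, S4, S5, S6, S7⟩ := ih v n v' n' h
      refine ⟨S1, ?_, S3, ?_, ?_, S6, ?_⟩
      · intro x hx
        rcases S2 x hx with h' | h'
        · exact Or.inl h'
        · exact Or.inr (List.mem_cons_of_mem _ h')
      · intro x hx hi
        rcases List.mem_cons.mp hx with rfl | hx'
        · have hv : x ∈ v := by
            by_contra hv
            exact hg ⟨hi.1, hi.2.1, hi.2.2.1, hi.2.2.2, hv⟩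
          exact S1 x hv
        · exact S4 x hx' hi
      · intro x hx
        rcases S5 x hx with h' | h'
        · exact Or.inl h'
        · exact Or.inr ⟨List.mem_cons_of_mem _ h'.1, h'.2⟩
      · intro x hx hi hv hOx
        rcases List.mem_cons.mp hx with rfl | hx'
        · exact absurd ⟨hi.1, hi.2.1, hi.2.2.1, hi.2.2.2, hv⟩ hg
        · exact S7 x hx' hi hv hOx

theorem frontNone (dic : List (Int × Int × String)) (ps : List (Int × Int)) :
    ∀ (v : PySem.Set (Int × Int)) (n : List (Int × Int)),
      expandFrontier dic ps v n = none ↔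
        ∃ p ∈ ps, ∃ q ∈ nbrsB p, inbI q.1 q.2 ∧ q ∉ v ∧ getB dic q = some "P" := by
  induction ps with
  | nil => intro v n; simp [expandFrontier]
  | cons p0 ps ih =>
    intro v n
    simp only [expandFrontier]
    cases hc : expandCell dic v n (nbrsB p0) with
    | none =>
      obtain ⟨q, hq, hi, hv, hP⟩ := (cellNone dic (nbrsB p0) v n).mp hc
      exact iff_of_true rfl ⟨p0, by simp, q, hq, hi, hv, hP⟩
    | some vn =>
      obtain ⟨v1, n1⟩ := vn
      rw [ih v1 n1]
      obtain ⟨S1, S2, S3, S4, S5, S6, S7⟩ := cellSome dic (nbrsB p0) v n v1 n1 hc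
      constructor
      · rintro ⟨p, hp, q, hq, hi, hv1, hP⟩
        exact ⟨p, List.mem_cons_of_mem _ hp, q, hq, hi, fun hqv => hv1 (S1 q hqv), hP⟩
      · rintro ⟨p, hp, q, hq, hi, hv, hP⟩
        rcases List.mem_cons.mp hp with rfl | hp'
        · exfalso
          have hnone : expandCell dic v n (nbrsB p) = none :=
            (cellNone dic (nbrsB p) v n).mpr ⟨q, hq, hi, hv, hP⟩
          rw [hc] at hnone
          exact absurd hnone (by simp)
        · refine ⟨p, hp', q, hq, hi, ?_, hP⟩
          intro hq1
          rcases S3 q hq1 with h' | h'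
          · exact hv h'
          · exact h' hP

theorem alt_vals (c : Int × Int) (dic : List (Int × Int × String)) :
    check_alt c dic = 0 ∨ check_alt c dic = 1 := by
  simp only [check_alt]
  cases h1 : expandFrontier dic [(c.1, c.2)] (PySem.Set.add PySem.Set.empty (c.1, c.2)) []
  · simp
  · rename_i vn; obtain ⟨v1, f1⟩ := vn
    cases h2 : expandFrontier dic f1 v1 [] <;> simp [h2]

theorem pair_congr {a b a' b' : Int} (h1 : a = a') (h2 : b = b') :
    ((a, b) : Int × Int) = (a', b') := by subst h1; subst h2; rfl

theorem atP_intro (c : Int × Int) (dic : List (Int × Int × String)) (a b x y : Int)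
    (hx : c.1 + a = x) (hy : c.2 + b = y) (h : getB dic (x, y) = some "P") : atP c dic a b := by
  show getB dic (c.1 + a, c.2 + b) = some "P"; rw [hx, hy]; exact h

theorem atO_intro (c : Int × Int) (dic : List (Int × Int × String)) (a b x y : Int)
    (hx : c.1 + a = x) (hy : c.2 + b = y) (h : getB dic (x, y) = some "O") : atO c dic a b := by
  show getB dic (c.1 + a, c.2 + b) = some "O"; rw [hx, hy]; exact h

theorem atB_intro (c : Int × Int) (a b x y : Int)
    (hx : c.1 + a = x) (hy : c.2 + b = y) (h : inbI x y) : atB c a b := by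
  show inbI (c.1 + a) (c.2 + b); rw [hx, hy]; exact h

theorem atP_elim {c : Int × Int} {dic : List (Int × Int × String)} {a b : Int} (x y : Int)
    (h : atP c dic a b) (hx : c.1 + a = x) (hy : c.2 + b = y) : getB dic (x, y) = some "P" := by
  rw [← hx, ← hy]; exact h

theorem atO_elim {c : Int × Int} {dic : List (Int × Int × String)} {a b : Int} (x y : Int)
    (h : atO c dic a b) (hx : c.1 + a = x) (hy : c.2 + b = y) : getB dic (x, y) = some "O" := by
  rw [← hx, ← hy]; exact h

theorem atB_elim {c : Int × Int} {a b : Int} (x y : Int)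
    (h : atB c a b) (hx : c.1 + a = x) (hy : c.2 + b = y) : inbI x y := by
  rw [← hx, ← hy]; exact h

theorem alt_eq_zero_iff (c : Int × Int) (dic : List (Int × Int × String)) :
    check_alt c dic = 0 ↔ BCond c dic := by
  have hv0 : ∀ x : Int × Int, x ∈ PySem.Set.add PySem.Set.empty (c.1, c.2) ↔ x = (c.1, c.2) := by
    intro x
    rw [PySem.Set.mem_add _ _ _]
    simp [PySem.Set.empty]
  simp only [check_alt]
  cases h1 : expandFrontier dic [(c.1, c.2)] (PySem.Set.add PySem.Set.empty (c.1, c.2)) [] with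
  | none =>
    refine iff_of_true (by simp) ?_
    obtain ⟨p, hp, q, hq, hi, hv, hP⟩ := (frontNone dic [(c.1, c.2)] _ []).mp h1
    simp only [List.mem_cons, List.not_mem_nil, or_false] at hp
    subst hp
    simp only [nbrsB, List.mem_cons, List.not_mem_nil, or_false] at hq
    left
    rcases hq with rfl | rfl | rfl | rfl
    · exact (Or.inl ⟨atB_intro c (-1) (0) _ _ (by ring) (by ring) hi, atP_intro c dic (-1) (0) _ _ (by ring) (by ring) hP⟩)
    · exact (Or.inr (Or.inl ⟨atB_intro c (1) (0) _ _ (by ring) (by ring) hi, atP_intro c dic (1) (0) _ _ (by ring) (by ring) hP⟩))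
    · exact (Or.inr (Or.inr (Or.inl ⟨atB_intro c (0) (-1) _ _ (by ring) (by ring) hi, atP_intro c dic (0) (-1) _ _ (by ring) (by ring) hP⟩)))
    · exact (Or.inr (Or.inr (Or.inr ⟨atB_intro c (0) (1) _ _ (by ring) (by ring) hi, atP_intro c dic (0) (1) _ _ (by ring) (by ring) hP⟩)))
  | some vn =>
    obtain ⟨v1, f1⟩ := vn
    have hc : expandCell dic (PySem.Set.add PySem.Set.empty (c.1, c.2)) [] (nbrsB (c.1, c.2)) = some (v1, f1) := by
      simp only [expandFrontier] at h1
      cases hcc : expandCell dic (PySem.Set.add PySem.Set.empty (c.1, c.2)) [] (nbrsB (c.1, c.2)) with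
      | none => rw [hcc] at h1; exact absurd h1 (by simp)
      | some vn2 =>
        obtain ⟨a, b⟩ := vn2
        rw [hcc] at h1
        simp only [expandFrontier, Option.some.injEq] at h1
        rw [h1]
    obtain ⟨S1, S2, S3, S4, S5, S6, S7⟩ := cellSome dic (nbrsB (c.1, c.2)) _ _ _ _ hc
    cases hr2 : expandFrontier dic f1 v1 [] with
    | none =>
      refine iff_of_true (by simp [hr2]) ?_
      obtain ⟨p, hpf, q, hqn, hqi, hqv, hqP⟩ := (frontNone dic f1 v1 []).mp hr2
      rcases S5 p hpf with h | ⟨hpm, hpi, hpO⟩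
      · exact absurd h (by simp)
      have hqns : q ≠ (c.1, c.2) := fun he => hqv (S1 _ ((hv0 q).mpr he))
      simp only [nbrsB, List.mem_cons, List.not_mem_nil, or_false] at hpm
      right
      rcases hpm with rfl | rfl | rfl | rfl
      · simp only [nbrsB, List.mem_cons, List.not_mem_nil, or_false] at hqn
        rcases hqn with rfl | rfl | rfl | rfl
        · exact (Or.inl ⟨atB_intro c (-1) (0) _ _ (by ring) (by ring) hpi, atO_intro c dic (-1) (0) _ _ (by ring) (by ring) hpO, (Or.inl ⟨atB_intro c (-2) (0) _ _ (by ring) (by ring) hqi, atP_intro c dic (-2) (0) _ _ (by ring) (by ring) hqP⟩)⟩)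
        · exact absurd (pair_congr (by ring) (by ring)) hqns
        · exact (Or.inl ⟨atB_intro c (-1) (0) _ _ (by ring) (by ring) hpi, atO_intro c dic (-1) (0) _ _ (by ring) (by ring) hpO, (Or.inr (Or.inl ⟨atB_intro c (-1) (-1) _ _ (by ring) (by ring) hqi, atP_intro c dic (-1) (-1) _ _ (by ring) (by ring) hqP⟩))⟩)
        · exact (Or.inl ⟨atB_intro c (-1) (0) _ _ (by ring) (by ring) hpi, atO_intro c dic (-1) (0) _ _ (by ring) (by ring) hpO, (Or.inr (Or.inr ⟨atB_intro c (-1) (1) _ _ (by ring) (by ring) hqi, atP_intro c dic (-1) (1) _ _ (by ring) (by ring) hqP⟩))⟩)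
      · simp only [nbrsB, List.mem_cons, List.not_mem_nil, or_false] at hqn
        rcases hqn with rfl | rfl | rfl | rfl
        · exact absurd (pair_congr (by ring) (by ring)) hqns
        · exact (Or.inr (Or.inl ⟨atB_intro c (1) (0) _ _ (by ring) (by ring) hpi, atO_intro c dic (1) (0) _ _ (by ring) (by ring) hpO, (Or.inl ⟨atB_intro c (2) (0) _ _ (by ring) (by ring) hqi, atP_intro c dic (2) (0) _ _ (by ring) (by ring) hqP⟩)⟩))
        · exact (Or.inr (Or.inl ⟨atB_intro c (1) (0) _ _ (by ring) (by ring) hpi, atO_intro c dic (1) (0) _ _ (by ring) (by ring) hpO, (Or.inr (Or.inl ⟨atB_intro c (1) (-1) _ _ (by ring) (by ring) hqi, atP_intro c dic (1) (-1) _ _ (by ring) (by ring) hqP⟩))⟩))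
        · exact (Or.inr (Or.inl ⟨atB_intro c (1) (0) _ _ (by ring) (by ring) hpi, atO_intro c dic (1) (0) _ _ (by ring) (by ring) hpO, (Or.inr (Or.inr ⟨atB_intro c (1) (1) _ _ (by ring) (by ring) hqi, atP_intro c dic (1) (1) _ _ (by ring) (by ring) hqP⟩))⟩))
      · simp only [nbrsB, List.mem_cons, List.not_mem_nil, or_false] at hqn
        rcases hqn with rfl | rfl | rfl | rfl
        · exact (Or.inr (Or.inr (Or.inl ⟨atB_intro c (0) (-1) _ _ (by ring) (by ring) hpi, atO_intro c dic (0) (-1) _ _ (by ring) (by ring) hpO, (Or.inr (Or.inl ⟨atB_intro c (-1) (-1) _ _ (by ring) (by ring) hqi, atP_intro c dic (-1) (-1) _ _ (by ring) (by ring) hqP⟩))⟩)))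
        · exact (Or.inr (Or.inr (Or.inl ⟨atB_intro c (0) (-1) _ _ (by ring) (by ring) hpi, atO_intro c dic (0) (-1) _ _ (by ring) (by ring) hpO, (Or.inr (Or.inr ⟨atB_intro c (1) (-1) _ _ (by ring) (by ring) hqi, atP_intro c dic (1) (-1) _ _ (by ring) (by ring) hqP⟩))⟩)))
        · exact (Or.inr (Or.inr (Or.inl ⟨atB_intro c (0) (-1) _ _ (by ring) (by ring) hpi, atO_intro c dic (0) (-1) _ _ (by ring) (by ring) hpO, (Or.inl ⟨atB_intro c (0) (-2) _ _ (by ring) (by ring) hqi, atP_intro c dic (0) (-2) _ _ (by ring) (by ring) hqP⟩)⟩)))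
        · exact absurd (pair_congr (by ring) (by ring)) hqns
      · simp only [nbrsB, List.mem_cons, List.not_mem_nil, or_false] at hqn
        rcases hqn with rfl | rfl | rfl | rfl
        · exact (Or.inr (Or.inr (Or.inr ⟨atB_intro c (0) (1) _ _ (by ring) (by ring) hpi, atO_intro c dic (0) (1) _ _ (by ring) (by ring) hpO, (Or.inr (Or.inl ⟨atB_intro c (-1) (1) _ _ (by ring) (by ring) hqi, atP_intro c dic (-1) (1) _ _ (by ring) (by ring) hqP⟩))⟩)))
        · exact (Or.inr (Or.inr (Or.inr ⟨atB_intro c (0) (1) _ _ (by ring) (by ring) hpi, atO_intro c dic (0) (1) _ _ (by ring) (by ring) hpO, (Or.inr (Or.inr ⟨atB_intro c (1) (1) _ _ (by ring) (by ring) hqi, atP_intro c dic (1) (1) _ _ (by ring) (by ring) hqP⟩))⟩)))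
        · exact absurd (pair_congr (by ring) (by ring)) hqns
        · exact (Or.inr (Or.inr (Or.inr ⟨atB_intro c (0) (1) _ _ (by ring) (by ring) hpi, atO_intro c dic (0) (1) _ _ (by ring) (by ring) hpO, (Or.inl ⟨atB_intro c (0) (2) _ _ (by ring) (by ring) hqi, atP_intro c dic (0) (2) _ _ (by ring) (by ring) hqP⟩)⟩)))
    | some vn2 =>
      refine iff_of_false (by simp [hr2]) ?_
      rintro ((⟨hb, hp⟩ | ⟨hb, hp⟩ | ⟨hb, hp⟩ | ⟨hb, hp⟩) | (⟨hb, hO, ht⟩ | ⟨hb, hO, ht⟩ | ⟨hb, hO, ht⟩ | ⟨hb, hO, ht⟩))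
      · have hnone : expandCell dic (PySem.Set.add PySem.Set.empty (c.1, c.2)) [] (nbrsB (c.1, c.2)) = none := by
          refine (cellNone dic (nbrsB (c.1, c.2)) _ _).mpr
            ⟨((c.1 - 1, c.2) : Int × Int), by simp [nbrsB], atB_elim _ _ hb (by ring) (by ring), ?_,
             atP_elim _ _ hp (by ring) (by ring)⟩
          rw [hv0]; intro he; rw [Prod.mk.injEq] at he; omega
        rw [hc] at hnone; exact absurd hnone (by simp)
      · have hnone : expandCell dic (PySem.Set.add PySem.Set.empty (c.1, c.2)) [] (nbrsB (c.1, c.2)) = none := by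
          refine (cellNone dic (nbrsB (c.1, c.2)) _ _).mpr
            ⟨((c.1 + 1, c.2) : Int × Int), by simp [nbrsB], atB_elim _ _ hb (by ring) (by ring), ?_,
             atP_elim _ _ hp (by ring) (by ring)⟩
          rw [hv0]; intro he; rw [Prod.mk.injEq] at he; omega
        rw [hc] at hnone; exact absurd hnone (by simp)
      · have hnone : expandCell dic (PySem.Set.add PySem.Set.empty (c.1, c.2)) [] (nbrsB (c.1, c.2)) = none := by
          refine (cellNone dic (nbrsB (c.1, c.2)) _ _).mpr
            ⟨((c.1, c.2 - 1) : Int × Int), by simp [nbrsB], atB_elim _ _ hb (by ring) (by ring), ?_,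
             atP_elim _ _ hp (by ring) (by ring)⟩
          rw [hv0]; intro he; rw [Prod.mk.injEq] at he; omega
        rw [hc] at hnone; exact absurd hnone (by simp)
      · have hnone : expandCell dic (PySem.Set.add PySem.Set.empty (c.1, c.2)) [] (nbrsB (c.1, c.2)) = none := by
          refine (cellNone dic (nbrsB (c.1, c.2)) _ _).mpr
            ⟨((c.1, c.2 + 1) : Int × Int), by simp [nbrsB], atB_elim _ _ hb (by ring) (by ring), ?_,
             atP_elim _ _ hp (by ring) (by ring)⟩
          rw [hv0]; intro he; rw [Prod.mk.injEq] at he; omega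
        rw [hc] at hnone; exact absurd hnone (by simp)
      · rcases ht with ⟨htb, htp⟩ | ⟨htb, htp⟩ | ⟨htb, htp⟩
        · have hpf : (((c.1 - 1, c.2)) : Int × Int) ∈ f1 := by
            refine S7 _ (by simp [nbrsB]) (atB_elim _ _ hb (by ring) (by ring)) ?_
              (atO_elim _ _ hO (by ring) (by ring))
            rw [hv0]; intro he; rw [Prod.mk.injEq] at he; omega
          have hnone : expandFrontier dic f1 v1 [] = none := by
            refine (frontNone dic f1 v1 []).mpr ⟨_, hpf, ((c.1 - 1 - 1, c.2) : Int × Int), by simp [nbrsB],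
              atB_elim _ _ htb (by ring) (by ring), ?_, atP_elim _ _ htp (by ring) (by ring)⟩
            intro hq1
            rcases S2 _ hq1 with h' | h'
            · rw [hv0] at h'; rw [Prod.mk.injEq] at h'; omega
            · simp only [nbrsB, List.mem_cons, List.not_mem_nil, or_false, Prod.mk.injEq] at h'; omega
          rw [hr2] at hnone; exact absurd hnone (by simp)
        · have hpf : (((c.1 - 1, c.2)) : Int × Int) ∈ f1 := by
            refine S7 _ (by simp [nbrsB]) (atB_elim _ _ hb (by ring) (by ring)) ?_
              (atO_elim _ _ hO (by ring) (by ring))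
            rw [hv0]; intro he; rw [Prod.mk.injEq] at he; omega
          have hnone : expandFrontier dic f1 v1 [] = none := by
            refine (frontNone dic f1 v1 []).mpr ⟨_, hpf, ((c.1 - 1, c.2 - 1) : Int × Int), by simp [nbrsB],
              atB_elim _ _ htb (by ring) (by ring), ?_, atP_elim _ _ htp (by ring) (by ring)⟩
            intro hq1
            rcases S2 _ hq1 with h' | h'
            · rw [hv0] at h'; rw [Prod.mk.injEq] at h'; omega
            · simp only [nbrsB, List.mem_cons, List.not_mem_nil, or_false, Prod.mk.injEq] at h'; omega
          rw [hr2] at hnone; exact absurd hnone (by simp)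
        · have hpf : (((c.1 - 1, c.2)) : Int × Int) ∈ f1 := by
            refine S7 _ (by simp [nbrsB]) (atB_elim _ _ hb (by ring) (by ring)) ?_
              (atO_elim _ _ hO (by ring) (by ring))
            rw [hv0]; intro he; rw [Prod.mk.injEq] at he; omega
          have hnone : expandFrontier dic f1 v1 [] = none := by
            refine (frontNone dic f1 v1 []).mpr ⟨_, hpf, ((c.1 - 1, c.2 + 1) : Int × Int), by simp [nbrsB],
              atB_elim _ _ htb (by ring) (by ring), ?_, atP_elim _ _ htp (by ring) (by ring)⟩
            intro hq1
            rcases S2 _ hq1 with h' | h'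
            · rw [hv0] at h'; rw [Prod.mk.injEq] at h'; omega
            · simp only [nbrsB, List.mem_cons, List.not_mem_nil, or_false, Prod.mk.injEq] at h'; omega
          rw [hr2] at hnone; exact absurd hnone (by simp)
      · rcases ht with ⟨htb, htp⟩ | ⟨htb, htp⟩ | ⟨htb, htp⟩
        · have hpf : (((c.1 + 1, c.2)) : Int × Int) ∈ f1 := by
            refine S7 _ (by simp [nbrsB]) (atB_elim _ _ hb (by ring) (by ring)) ?_
              (atO_elim _ _ hO (by ring) (by ring))
            rw [hv0]; intro he; rw [Prod.mk.injEq] at he; omega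
          have hnone : expandFrontier dic f1 v1 [] = none := by
            refine (frontNone dic f1 v1 []).mpr ⟨_, hpf, ((c.1 + 1 + 1, c.2) : Int × Int), by simp [nbrsB],
              atB_elim _ _ htb (by ring) (by ring), ?_, atP_elim _ _ htp (by ring) (by ring)⟩
            intro hq1
            rcases S2 _ hq1 with h' | h'
            · rw [hv0] at h'; rw [Prod.mk.injEq] at h'; omega
            · simp only [nbrsB, List.mem_cons, List.not_mem_nil, or_false, Prod.mk.injEq] at h'; omega
          rw [hr2] at hnone; exact absurd hnone (by simp)
        · have hpf : (((c.1 + 1, c.2)) : Int × Int) ∈ f1 := by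
            refine S7 _ (by simp [nbrsB]) (atB_elim _ _ hb (by ring) (by ring)) ?_
              (atO_elim _ _ hO (by ring) (by ring))
            rw [hv0]; intro he; rw [Prod.mk.injEq] at he; omega
          have hnone : expandFrontier dic f1 v1 [] = none := by
            refine (frontNone dic f1 v1 []).mpr ⟨_, hpf, ((c.1 + 1, c.2 - 1) : Int × Int), by simp [nbrsB],
              atB_elim _ _ htb (by ring) (by ring), ?_, atP_elim _ _ htp (by ring) (by ring)⟩
            intro hq1
            rcases S2 _ hq1 with h' | h'
            · rw [hv0] at h'; rw [Prod.mk.injEq] at h'; omega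
            · simp only [nbrsB, List.mem_cons, List.not_mem_nil, or_false, Prod.mk.injEq] at h'; omega
          rw [hr2] at hnone; exact absurd hnone (by simp)
        · have hpf : (((c.1 + 1, c.2)) : Int × Int) ∈ f1 := by
            refine S7 _ (by simp [nbrsB]) (atB_elim _ _ hb (by ring) (by ring)) ?_
              (atO_elim _ _ hO (by ring) (by ring))
            rw [hv0]; intro he; rw [Prod.mk.injEq] at he; omega
          have hnone : expandFrontier dic f1 v1 [] = none := by
            refine (frontNone dic f1 v1 []).mpr ⟨_, hpf, ((c.1 + 1, c.2 + 1) : Int × Int), by simp [nbrsB],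
              atB_elim _ _ htb (by ring) (by ring), ?_, atP_elim _ _ htp (by ring) (by ring)⟩
            intro hq1
            rcases S2 _ hq1 with h' | h'
            · rw [hv0] at h'; rw [Prod.mk.injEq] at h'; omega
            · simp only [nbrsB, List.mem_cons, List.not_mem_nil, or_false, Prod.mk.injEq] at h'; omega
          rw [hr2] at hnone; exact absurd hnone (by simp)
      · rcases ht with ⟨htb, htp⟩ | ⟨htb, htp⟩ | ⟨htb, htp⟩
        · have hpf : (((c.1, c.2 - 1)) : Int × Int) ∈ f1 := by
            refine S7 _ (by simp [nbrsB]) (atB_elim _ _ hb (by ring) (by ring)) ?_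
              (atO_elim _ _ hO (by ring) (by ring))
            rw [hv0]; intro he; rw [Prod.mk.injEq] at he; omega
          have hnone : expandFrontier dic f1 v1 [] = none := by
            refine (frontNone dic f1 v1 []).mpr ⟨_, hpf, ((c.1, c.2 - 1 - 1) : Int × Int), by simp [nbrsB],
              atB_elim _ _ htb (by ring) (by ring), ?_, atP_elim _ _ htp (by ring) (by ring)⟩
            intro hq1
            rcases S2 _ hq1 with h' | h'
            · rw [hv0] at h'; rw [Prod.mk.injEq] at h'; omega
            · simp only [nbrsB, List.mem_cons, List.not_mem_nil, or_false, Prod.mk.injEq] at h'; omega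
          rw [hr2] at hnone; exact absurd hnone (by simp)
        · have hpf : (((c.1, c.2 - 1)) : Int × Int) ∈ f1 := by
            refine S7 _ (by simp [nbrsB]) (atB_elim _ _ hb (by ring) (by ring)) ?_
              (atO_elim _ _ hO (by ring) (by ring))
            rw [hv0]; intro he; rw [Prod.mk.injEq] at he; omega
          have hnone : expandFrontier dic f1 v1 [] = none := by
            refine (frontNone dic f1 v1 []).mpr ⟨_, hpf, ((c.1 - 1, c.2 - 1) : Int × Int), by simp [nbrsB],
              atB_elim _ _ htb (by ring) (by ring), ?_, atP_elim _ _ htp (by ring) (by ring)⟩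
            intro hq1
            rcases S2 _ hq1 with h' | h'
            · rw [hv0] at h'; rw [Prod.mk.injEq] at h'; omega
            · simp only [nbrsB, List.mem_cons, List.not_mem_nil, or_false, Prod.mk.injEq] at h'; omega
          rw [hr2] at hnone; exact absurd hnone (by simp)
        · have hpf : (((c.1, c.2 - 1)) : Int × Int) ∈ f1 := by
            refine S7 _ (by simp [nbrsB]) (atB_elim _ _ hb (by ring) (by ring)) ?_
              (atO_elim _ _ hO (by ring) (by ring))
            rw [hv0]; intro he; rw [Prod.mk.injEq] at he; omega
          have hnone : expandFrontier dic f1 v1 [] = none := by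
            refine (frontNone dic f1 v1 []).mpr ⟨_, hpf, ((c.1 + 1, c.2 - 1) : Int × Int), by simp [nbrsB],
              atB_elim _ _ htb (by ring) (by ring), ?_, atP_elim _ _ htp (by ring) (by ring)⟩
            intro hq1
            rcases S2 _ hq1 with h' | h'
            · rw [hv0] at h'; rw [Prod.mk.injEq] at h'; omega
            · simp only [nbrsB, List.mem_cons, List.not_mem_nil, or_false, Prod.mk.injEq] at h'; omega
          rw [hr2] at hnone; exact absurd hnone (by simp)
      · rcases ht with ⟨htb, htp⟩ | ⟨htb, htp⟩ | ⟨htb, htp⟩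
        · have hpf : (((c.1, c.2 + 1)) : Int × Int) ∈ f1 := by
            refine S7 _ (by simp [nbrsB]) (atB_elim _ _ hb (by ring) (by ring)) ?_
              (atO_elim _ _ hO (by ring) (by ring))
            rw [hv0]; intro he; rw [Prod.mk.injEq] at he; omega
          have hnone : expandFrontier dic f1 v1 [] = none := by
            refine (frontNone dic f1 v1 []).mpr ⟨_, hpf, ((c.1, c.2 + 1 + 1) : Int × Int), by simp [nbrsB],
              atB_elim _ _ htb (by ring) (by ring), ?_, atP_elim _ _ htp (by ring) (by ring)⟩
            intro hq1
            rcases S2 _ hq1 with h' | h'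
            · rw [hv0] at h'; rw [Prod.mk.injEq] at h'; omega
            · simp only [nbrsB, List.mem_cons, List.not_mem_nil, or_false, Prod.mk.injEq] at h'; omega
          rw [hr2] at hnone; exact absurd hnone (by simp)
        · have hpf : (((c.1, c.2 + 1)) : Int × Int) ∈ f1 := by
            refine S7 _ (by simp [nbrsB]) (atB_elim _ _ hb (by ring) (by ring)) ?_
              (atO_elim _ _ hO (by ring) (by ring))
            rw [hv0]; intro he; rw [Prod.mk.injEq] at he; omega
          have hnone : expandFrontier dic f1 v1 [] = none := by
            refine (frontNone dic f1 v1 []).mpr ⟨_, hpf, ((c.1 - 1, c.2 + 1) : Int × Int), by simp [nbrsB],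
              atB_elim _ _ htb (by ring) (by ring), ?_, atP_elim _ _ htp (by ring) (by ring)⟩
            intro hq1
            rcases S2 _ hq1 with h' | h'
            · rw [hv0] at h'; rw [Prod.mk.injEq] at h'; omega
            · simp only [nbrsB, List.mem_cons, List.not_mem_nil, or_false, Prod.mk.injEq] at h'; omega
          rw [hr2] at hnone; exact absurd hnone (by simp)
        · have hpf : (((c.1, c.2 + 1)) : Int × Int) ∈ f1 := by
            refine S7 _ (by simp [nbrsB]) (atB_elim _ _ hb (by ring) (by ring)) ?_
              (atO_elim _ _ hO (by ring) (by ring))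
            rw [hv0]; intro he; rw [Prod.mk.injEq] at he; omega
          have hnone : expandFrontier dic f1 v1 [] = none := by
            refine (frontNone dic f1 v1 []).mpr ⟨_, hpf, ((c.1 + 1, c.2 + 1) : Int × Int), by simp [nbrsB],
              atB_elim _ _ htb (by ring) (by ring), ?_, atP_elim _ _ htp (by ring) (by ring)⟩
            intro hq1
            rcases S2 _ hq1 with h' | h'
            · rw [hv0] at h'; rw [Prod.mk.injEq] at h'; omega
            · simp only [nbrsB, List.mem_cons, List.not_mem_nil, or_false, Prod.mk.injEq] at h'; omega
          rw [hr2] at hnone; exact absurd hnone (by simp)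

-- ---- ACond and BCond agree on admitted inputs ----

theorem atB_of (c : Int × Int) (a b : Int) (h1 : 0 ≤ c.1 + a) (h2 : c.1 + a ≤ 4)
    (h3 : 0 ≤ c.2 + b) (h4 : c.2 + b ≤ 4) : atB c a b := ⟨h1, h2, h3, h4⟩

theorem atB_dest {c : Int × Int} {a b : Int} (h : atB c a b) :
    0 ≤ c.1 + a ∧ c.1 + a ≤ 4 ∧ 0 ≤ c.2 + b ∧ c.2 + b ≤ 4 := h

theorem AtoB (c : Int × Int) (dic : List (Int × Int × String))
    (g1 : 0 ≤ c.1) (g2 : c.1 ≤ 4) (g3 : 0 ≤ c.2) (g4 : c.2 ≤ 4)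
    (hA : ACond c dic) : BCond c dic := by
  rcases hA with (h | h | h) | (h | h | h) | (h | h | h) | (h | h | h)
  · exact Or.inl (Or.inl h)
  · obtain ⟨hb, hp, hO⟩ := h
    have hd := atB_dest hb
    rcases hO with hO | hO
    · exact Or.inr (Or.inr (Or.inr (Or.inl ⟨atB_of c 0 (-1) (by omega) (by omega) (by omega) (by omega), hO, Or.inr (Or.inl ⟨hb, hp⟩)⟩)))
    · exact Or.inr (Or.inl ⟨atB_of c (-1) 0 (by omega) (by omega) (by omega) (by omega), hO, Or.inr (Or.inl ⟨hb, hp⟩)⟩)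
  · obtain ⟨hb, hp, hOP⟩ := h
    have hd := atB_dest hb
    rcases hOP with hO | hP
    · exact Or.inr (Or.inl ⟨atB_of c (-1) 0 (by omega) (by omega) (by omega) (by omega), hO, Or.inl ⟨hb, hp⟩⟩)
    · exact Or.inl (Or.inl ⟨atB_of c (-1) 0 (by omega) (by omega) (by omega) (by omega), hP⟩)
  · exact Or.inl (Or.inr (Or.inl h))
  · obtain ⟨hb, hp, hO⟩ := h
    have hd := atB_dest hb
    rcases hO with hO | hO
    · exact Or.inr (Or.inr (Or.inr (Or.inr ⟨atB_of c 0 1 (by omega) (by omega) (by omega) (by omega), hO, Or.inr (Or.inl ⟨hb, hp⟩)⟩)))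
    · exact Or.inr (Or.inl ⟨atB_of c (-1) 0 (by omega) (by omega) (by omega) (by omega), hO, Or.inr (Or.inr ⟨hb, hp⟩)⟩)
  · obtain ⟨hb, hp, hOP⟩ := h
    have hd := atB_dest hb
    rcases hOP with hO | hP
    · exact Or.inr (Or.inr (Or.inl ⟨atB_of c 1 0 (by omega) (by omega) (by omega) (by omega), hO, Or.inl ⟨hb, hp⟩⟩))
    · exact Or.inl (Or.inr (Or.inl ⟨atB_of c 1 0 (by omega) (by omega) (by omega) (by omega), hP⟩))
  · exact Or.inl (Or.inr (Or.inr (Or.inl h)))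
  · obtain ⟨hb, hp, hO⟩ := h
    have hd := atB_dest hb
    rcases hO with hO | hO
    · exact Or.inr (Or.inr (Or.inr (Or.inl ⟨atB_of c 0 (-1) (by omega) (by omega) (by omega) (by omega), hO, Or.inr (Or.inr ⟨hb, hp⟩)⟩)))
    · exact Or.inr (Or.inr (Or.inl ⟨atB_of c 1 0 (by omega) (by omega) (by omega) (by omega), hO, Or.inr (Or.inl ⟨hb, hp⟩)⟩))
  · obtain ⟨hb, hp, hOP⟩ := h
    have hd := atB_dest hb
    rcases hOP with hO | hP
    · exact Or.inr (Or.inr (Or.inr (Or.inl ⟨atB_of c 0 (-1) (by omega) (by omega) (by omega) (by omega), hO, Or.inl ⟨hb, hp⟩⟩)))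
    · exact Or.inl (Or.inr (Or.inr (Or.inl ⟨atB_of c 0 (-1) (by omega) (by omega) (by omega) (by omega), hP⟩)))
  · exact Or.inl (Or.inr (Or.inr (Or.inr h)))
  · obtain ⟨hb, hp, hO⟩ := h
    have hd := atB_dest hb
    rcases hO with hO | hO
    · exact Or.inr (Or.inr (Or.inr (Or.inr ⟨atB_of c 0 1 (by omega) (by omega) (by omega) (by omega), hO, Or.inr (Or.inr ⟨hb, hp⟩)⟩)))
    · exact Or.inr (Or.inr (Or.inl ⟨atB_of c 1 0 (by omega) (by omega) (by omega) (by omega), hO, Or.inr (Or.inr ⟨hb, hp⟩)⟩))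
  · obtain ⟨hb, hp, hOP⟩ := h
    have hd := atB_dest hb
    rcases hOP with hO | hP
    · exact Or.inr (Or.inr (Or.inr (Or.inr ⟨atB_of c 0 1 (by omega) (by omega) (by omega) (by omega), hO, Or.inl ⟨hb, hp⟩⟩)))
    · exact Or.inl (Or.inr (Or.inr (Or.inr ⟨atB_of c 0 1 (by omega) (by omega) (by omega) (by omega), hP⟩)))

theorem BtoA (c : Int × Int) (dic : List (Int × Int × String)) (hB : BCond c dic) :
    ACond c dic := by
  rcases hB with (h | h | h | h) | (h | h | h | h)
  · exact Or.inl (Or.inl h)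
  · exact Or.inr (Or.inl (Or.inl h))
  · exact Or.inr (Or.inr (Or.inl (Or.inl h)))
  · exact Or.inr (Or.inr (Or.inr (Or.inl h)))
  · obtain ⟨hb, hO, ht⟩ := h
    rcases ht with ⟨tb, tp⟩ | ⟨tb, tp⟩ | ⟨tb, tp⟩
    · exact Or.inl (Or.inr (Or.inr ⟨tb, tp, Or.inl hO⟩))
    · exact Or.inl (Or.inr (Or.inl ⟨tb, tp, Or.inr hO⟩))
    · exact Or.inr (Or.inl (Or.inr (Or.inl ⟨tb, tp, Or.inr hO⟩)))
  · obtain ⟨hb, hO, ht⟩ := h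
    rcases ht with ⟨tb, tp⟩ | ⟨tb, tp⟩ | ⟨tb, tp⟩
    · exact Or.inr (Or.inl (Or.inr (Or.inr ⟨tb, tp, Or.inl hO⟩)))
    · exact Or.inr (Or.inr (Or.inl (Or.inr (Or.inl ⟨tb, tp, Or.inr hO⟩))))
    · exact Or.inr (Or.inr (Or.inr (Or.inr (Or.inl ⟨tb, tp, Or.inr hO⟩))))
  · obtain ⟨hb, hO, ht⟩ := h
    rcases ht with ⟨tb, tp⟩ | ⟨tb, tp⟩ | ⟨tb, tp⟩
    · exact Or.inr (Or.inr (Or.inl (Or.inr (Or.inr ⟨tb, tp, Or.inl hO⟩))))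
    · exact Or.inl (Or.inr (Or.inl ⟨tb, tp, Or.inl hO⟩))
    · exact Or.inr (Or.inr (Or.inl (Or.inr (Or.inl ⟨tb, tp, Or.inl hO⟩))))
  · obtain ⟨hb, hO, ht⟩ := h
    rcases ht with ⟨tb, tp⟩ | ⟨tb, tp⟩ | ⟨tb, tp⟩
    · exact Or.inr (Or.inr (Or.inr (Or.inr (Or.inr ⟨tb, tp, Or.inl hO⟩))))
    · exact Or.inr (Or.inl (Or.inr (Or.inl ⟨tb, tp, Or.inl hO⟩)))
    · exact Or.inr (Or.inr (Or.inr (Or.inr (Or.inl ⟨tb, tp, Or.inl hO⟩))))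

theorem notouch_none (c : Int × Int) (dic : List (Int × Int × String))
    (h : ∀ o ∈ offsAll, inbB (c.1 + o.1, c.2 + o.2) = false) :
    ¬ ACond c dic ∧ ¬ BCond c dic := by
  have h' : ∀ o ∈ offsAll,
      ¬ (0 ≤ c.1 + o.1 ∧ c.1 + o.1 ≤ 4 ∧ 0 ≤ c.2 + o.2 ∧ c.2 + o.2 ≤ 4) := by
    intro o ho
    have := h o ho
    simpa [inbB] using this
  have n1 : ¬ atB c (-1) 0 := fun hb => h' (-1, 0) (by simp [offsAll]) hb
  have n2 : ¬ atB c 1 0 := fun hb => h' (1, 0) (by simp [offsAll]) hb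
  have n3 : ¬ atB c 0 (-1) := fun hb => h' (0, -1) (by simp [offsAll]) hb
  have n4 : ¬ atB c 0 1 := fun hb => h' (0, 1) (by simp [offsAll]) hb
  have n5 : ¬ atB c (-1) (-1) := fun hb => h' (-1, -1) (by simp [offsAll]) hb
  have n6 : ¬ atB c (-1) 1 := fun hb => h' (-1, 1) (by simp [offsAll]) hb
  have n7 : ¬ atB c 1 (-1) := fun hb => h' (1, -1) (by simp [offsAll]) hb
  have n8 : ¬ atB c 1 1 := fun hb => h' (1, 1) (by simp [offsAll]) hb
  have n9 : ¬ atB c (-2) 0 := fun hb => h' (-2, 0) (by simp [offsAll]) hb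
  have n10 : ¬ atB c 2 0 := fun hb => h' (2, 0) (by simp [offsAll]) hb
  have n11 : ¬ atB c 0 (-2) := fun hb => h' (0, -2) (by simp [offsAll]) hb
  have n12 : ¬ atB c 0 2 := fun hb => h' (0, 2) (by simp [offsAll]) hb
  constructor
  · rintro ((⟨hb, -⟩ | ⟨hb, -, -⟩ | ⟨hb, -, -⟩) | (⟨hb, -⟩ | ⟨hb, -, -⟩ | ⟨hb, -, -⟩) |
      (⟨hb, -⟩ | ⟨hb, -, -⟩ | ⟨hb, -, -⟩) | (⟨hb, -⟩ | ⟨hb, -, -⟩ | ⟨hb, -, -⟩)) <;>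
      first
        | exact n1 hb | exact n2 hb | exact n3 hb | exact n4 hb | exact n5 hb | exact n6 hb
        | exact n7 hb | exact n8 hb | exact n9 hb | exact n10 hb | exact n11 hb | exact n12 hb
  · rintro ((⟨hb, -⟩ | ⟨hb, -⟩ | ⟨hb, -⟩ | ⟨hb, -⟩) |
      (⟨hb, -, -⟩ | ⟨hb, -, -⟩ | ⟨hb, -, -⟩ | ⟨hb, -, -⟩)) <;>
      first
        | exact n1 hb | exact n2 hb | exact n3 hb | exact n4 hb

-- ===== VERDICT (by name: the statement is the Claim_ definition above) =====
theorem check_spec : Claim_equal_check := by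
  intro c dic _hdom hpre
  show check c dic = check_alt c dic
  have hA0 := check_eq_zero_iff c dic
  have hB0 := alt_eq_zero_iff c dic
  have hiff : ACond c dic ↔ BCond c dic := by
    rcases hpre with hnt | ⟨⟨g1, g2, g3, g4⟩, -⟩
    · obtain ⟨hna, hnb⟩ := notouch_none c dic hnt
      exact iff_of_false hna hnb
    · exact ⟨AtoB c dic g1 g2 g3 g4, BtoA c dic⟩
  rcases check_vals c dic with h | h <;> rcases alt_vals c dic with h' | h'
  · rw [h, h']
  · have := hB0.mpr (hiff.mp (hA0.mp h))
    omega
  · have := hA0.mpr (hiff.mpr (hB0.mp h'))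
    omega
  · rw [h, h']
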